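-- pv_equiv track=rewrite | github.com/Zwin-ux/P-V-NP | core/sat_solver.py | _simplify_clauses
-- ===== SOURCE A (Python) =====
-- from typing import List, Optional, Dict, Tuple
--
-- def _simplify_clauses(clauses: List[List[int]], assignment: List[Optional[bool]]) -> List[List[int]]:
--     """
--     Simplify clauses based on current assignment.
--
--     Args:
--         clauses: List of clauses to simplify
--         assignment: Current variable assignment
--
--     Returns:
--         List of simplified clauses
--     """
--     simplified = []
--
--     for clause in clauses:
--         new_clause = []
--         clause_satisfied = False
--
--         for literal in clause:
--             var_index = abs(literal) - 1
--             var_value = assignment[var_index]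
--
--             if var_value is None:
--                 # Variable not assigned yet, keep literal
--                 new_clause.append(literal)
--             elif (literal > 0 and var_value) or (literal < 0 and not var_value):
--                 # Literal is satisfied, entire clause is satisfied
--                 clause_satisfied = True
--                 break
--             # If literal is false, don't add it to new_clause
--
--         if not clause_satisfied:
--             simplified.append(new_clause)
--
--     return simplified
-- ===== SOURCE B (Python) =====
-- from typing import List, Optional
--
-- def _simplify_clauses(clauses: List[List[int]], assignment: List[Optional[bool]]) -> List[List[int]]:
--     def keep(clause: List[int], i: int) -> Optional[List[int]]:
--         # None = clause satisfied from position i on; otherwise the unassigned literals from i on.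
--         if i >= len(clause):
--             return []
--         lit = clause[i]
--         v = assignment[abs(lit) - 1]
--         if v is None:
--             tail = keep(clause, i + 1)
--             return None if tail is None else [lit] + tail
--         if (v and lit > 0) or (not v and lit < 0):
--             return None
--         return keep(clause, i + 1)
--
--     def go(rest: List[List[int]]) -> List[List[int]]:
--         if not rest:
--             return []
--         r = keep(rest[0], 0)
--         tail = go(rest[1:])
--         return tail if r is None else [r] + tail
--
--     return go(clauses)
-- ===== Notes on version B (the rewrite author's own statement) =====
-- stated objective: alternative
-- what changed: Replaces A's iterative loops (mutable simplified/new_clause accumulators, clause_satisfied flag and break) with a fully recursive decomposition: an inner index-recursion that propagates None as the 'satisfied' signal instead of a flag, and an outer structural recursion that builds the result by consing instead of appending.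
import Mathlib
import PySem

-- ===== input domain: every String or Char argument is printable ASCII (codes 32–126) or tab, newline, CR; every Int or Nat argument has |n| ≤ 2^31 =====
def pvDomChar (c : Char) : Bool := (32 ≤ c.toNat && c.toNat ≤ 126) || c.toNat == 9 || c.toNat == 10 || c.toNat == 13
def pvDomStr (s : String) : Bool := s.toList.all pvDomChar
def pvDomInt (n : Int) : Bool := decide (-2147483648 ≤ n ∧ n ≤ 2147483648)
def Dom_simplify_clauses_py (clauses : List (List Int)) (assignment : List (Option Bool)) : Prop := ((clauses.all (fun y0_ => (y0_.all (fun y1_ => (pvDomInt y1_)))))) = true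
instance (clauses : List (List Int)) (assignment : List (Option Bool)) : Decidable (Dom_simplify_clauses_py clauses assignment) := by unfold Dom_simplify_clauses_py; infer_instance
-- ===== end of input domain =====

-- B replaces A's iterative loops (satisfied-flag + break + two mutable accumulators) with a
-- fully recursive decomposition: None-propagation signals a satisfied clause, consing builds the result.

-- ===== PORT A =====
-- inner 'for literal in clause' loop of A: carries new_clause as accumulator;
-- returns none when the clause is satisfied (break); pyGet? = none (IndexError,
-- excluded by Pre_) is also mapped to none (value unclaimed there).
def pvAClause (assignment : List (Option Bool)) (acc : List Int) : List Int → Option (List Int)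
  | [] => some acc
  | literal :: rest =>
    match PySem.List.pyGet? assignment (|literal| - 1) with
    | none => none
    | some none => pvAClause assignment (acc ++ [literal]) rest
    | some (some v) =>
      if (decide (literal > 0) && v) || (decide (literal < 0) && !v) then none
      else pvAClause assignment acc rest

def simplify_clauses_py (clauses : List (List Int)) (assignment : List (Option Bool)) : List (List Int) :=
  clauses.foldl (fun simplified clause =>
    match pvAClause assignment [] clause with
    | some new_clause => simplified ++ [new_clause]
    | none => simplified) []

-- ===== PORT B =====
-- B's inner recursion 'keep(clause, i)': none = clause satisfied from position i on,
-- some = the unassigned literals from i on; the '≤' guard is Python's 'i >= len(clause)'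
-- test and is the termination measure ('lit' is inlined as clause.getD i 0).
-- pyGet? = none (IndexError, excluded by Pre_) is mapped to none (value unclaimed there).
def pvBKeep (assignment : List (Option Bool)) (clause : List Int) (i : Nat) : Option (List Int) :=
  if _h : clause.length ≤ i then some []
  else
    match PySem.List.pyGet? assignment (|clause.getD i 0| - 1) with
    | none => none
    | some none =>
      match pvBKeep assignment clause (i + 1) with
      | none => none
      | some tail => some (clause.getD i 0 :: tail)
    | some (some v) =>
      if (v && decide (clause.getD i 0 > 0)) || (!v && decide (clause.getD i 0 < 0)) then none
      else pvBKeep assignment clause (i + 1)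
termination_by clause.length - i
decreasing_by all_goals omega

-- B's outer recursion 'go(rest)'
def pvBGo (assignment : List (Option Bool)) : List (List Int) → List (List Int)
  | [] => []
  | c :: rest =>
    match pvBKeep assignment c 0 with
    | none => pvBGo assignment rest
    | some r => r :: pvBGo assignment rest

def simplify_clauses_py_alt (clauses : List (List Int)) (assignment : List (Option Bool)) : List (List Int) :=
  pvBGo assignment clauses

-- ===== PRECONDITION & SPEC =====
-- true iff this literal is satisfied by the current assignment (used only to state Pre_)
def pvLitSat (assignment : List (Option Bool)) (lit : Int) : Bool :=
  (decide (lit > 0) && (PySem.List.pyGet? assignment (|lit| - 1) == some (some true)))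
  || (decide (lit < 0) && (PySem.List.pyGet? assignment (|lit| - 1) == some (some false)))

-- Pre_ excludes exactly the inputs on which A raises IndexError: a clause whose scan
-- reaches an out-of-range literal (|lit|-1 beyond Python's index range, including
-- negative wraparound) before any satisfied literal. Each clause must either have all
-- its literals in range, or contain a satisfied literal preceded only by in-range ones.
def Pre_simplify_clauses_py (clauses : List (List Int)) (assignment : List (Option Bool)) : Prop :=
  ∀ c ∈ clauses,
    (∀ l ∈ c, PySem.Raise.InRange assignment.length (|l| - 1)) ∨
    (∃ i < c.length, pvLitSat assignment (c.getD i 0) = true ∧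
        ∀ j ≤ i, PySem.Raise.InRange assignment.length (|c.getD j 0| - 1))
instance (clauses : List (List Int)) (assignment : List (Option Bool)) : Decidable (Pre_simplify_clauses_py clauses assignment) := by unfold Pre_simplify_clauses_py; infer_instance

def pvWitness_simplify_clauses_py : List (List Int) × List (Option Bool) :=
  ([[1, -2], [2, 3], [-1]], [some true, none, some false])

def Spec_simplify_clauses_py (clauses : List (List Int)) (assignment : List (Option Bool)) (out : List (List Int)) : Prop := out = simplify_clauses_py_alt clauses assignment
instance (clauses : List (List Int)) (assignment : List (Option Bool)) (out : List (List Int)) : Decidable (Spec_simplify_clauses_py clauses assignment out) := by unfold Spec_simplify_clauses_py; infer_instance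

-- ===== CLAIM (what is proved, stated in full; the proofs are below) =====
def Claim_equal_simplify_clauses_py : Prop := ∀ (clauses : List (List Int)) (assignment : List (Option Bool)), Dom_simplify_clauses_py clauses assignment → Pre_simplify_clauses_py clauses assignment → Spec_simplify_clauses_py clauses assignment (simplify_clauses_py clauses assignment)

-- ===== LEMMAS AND PROOFS =====

-- A's fused inner loop over the suffix clause.drop i equals B's inner recursion from
-- index i, with A's accumulator prepended (both map a raising scan to none);
-- n is fuel for the induction on the remaining length.
theorem pvAClause_eq_pvBKeep (assignment : List (Option Bool)) (clause : List Int) :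
    ∀ (n i : Nat), clause.length - i ≤ n → ∀ acc : List Int,
    pvAClause assignment acc (clause.drop i) =
      Option.map (fun t => acc ++ t) (pvBKeep assignment clause i) := by
  intro n
  induction n with
  | zero =>
    intro i hi acc
    have hle : clause.length ≤ i := by omega
    rw [List.drop_eq_nil_of_le hle, pvBKeep, dif_pos hle]
    simp [pvAClause]
  | succ n ih =>
    intro i hi acc
    by_cases hle : clause.length ≤ i
    · rw [List.drop_eq_nil_of_le hle, pvBKeep, dif_pos hle]
      simp [pvAClause]
    · have hlt : i < clause.length := by omega
      have hgd : clause.getD i 0 = clause[i] := List.getD_eq_getElem clause 0 hlt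
      rw [← List.getElem_cons_drop hlt, pvBKeep, dif_neg hle, hgd]
      cases hx : PySem.List.pyGet? assignment (|clause[i]| - 1) with
      | none => simp [pvAClause, hx]
      | some x =>
        cases x with
        | none =>
          simp only [pvAClause, hx, ih (i + 1) (by omega) (acc ++ [clause[i]])]
          cases pvBKeep assignment clause (i + 1) with
          | none => simp
          | some tail => simp
        | some v =>
          have hcond : ((v && decide (clause[i] > 0)) || (!v && decide (clause[i] < 0)))
              = ((decide (clause[i] > 0) && v) || (decide (clause[i] < 0) && !v)) := by
            cases v <;> simp
          simp only [pvAClause, hx, hcond]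
          by_cases hc : ((decide (clause[i] > 0) && v) || (decide (clause[i] < 0) && !v)) = true
      -- then branch: both none
          · simp [hc]
          · simp only [Bool.not_eq_true] at hc
            simp [hc, ih (i + 1) (by omega) acc]

-- lifts the inner-loop equality through A's foldl vs B's structural recursion
theorem pv_fold_eq (assignment : List (Option Bool)) (clauses : List (List Int)) :
    ∀ acc : List (List Int),
    clauses.foldl (fun simplified clause =>
      match pvAClause assignment [] clause with
      | some new_clause => simplified ++ [new_clause]
      | none => simplified) acc = acc ++ pvBGo assignment clauses := by
  induction clauses with
  | nil => intro acc; simp [pvBGo]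
  | cons c rest ih =>
    intro acc
    have h0 : pvAClause assignment [] (c.drop 0) =
        Option.map (fun t => [] ++ t) (pvBKeep assignment c 0) :=
      pvAClause_eq_pvBKeep assignment c c.length 0 (by omega) []
    simp only [List.drop_zero, List.nil_append] at h0
    simp only [List.foldl_cons, pvBGo]
    cases hk : pvBKeep assignment c 0 with
    | none => rw [hk] at h0; simp only [Option.map_none] at h0; rw [h0, ih acc]
    | some r =>
      rw [hk] at h0; simp only [Option.map_some] at h0; rw [h0, ih (acc ++ [r])]
      simp

-- ===== VERDICT (by name: the statement is the Claim_ definition above) =====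
theorem simplify_clauses_py_spec : Claim_equal_simplify_clauses_py := by
  intro clauses assignment _ _
  unfold Spec_simplify_clauses_py simplify_clauses_py simplify_clauses_py_alt
  simpa using pv_fold_eq assignment clauses []
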